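-- pv_equiv track=rewrite | github.com/lingkai5wu/LeetCode | contest/w490/q3.py | ans1
-- ===== SOURCE A (Python) =====
-- def ans1(s: str, t: str) -> str:
--     t_cnt_1 = sum(c == '1' for c in t)
--     t_cnt_0 = sum(c == '0' for c in t)
--     res = ''
--     for i, c in enumerate(s):
--         if c == '0' and t_cnt_1 > 0:
--             res += '1'
--             t_cnt_1 -= 1
--             continue
--         if c == '1' and t_cnt_0 > 0:
--             res += '1'
--             t_cnt_0 -= 1
--             continue
--         res += '0'
--     return res
-- ===== SOURCE B (Python) =====
-- def ans1(s: str, t: str) -> str: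
--     t_cnt_1 = t.count('1')
--     t_cnt_0 = t.count('0')
--     res = ['0'] * len(s)
--     zi = [i for i, c in enumerate(s) if c == '0']
--     oi = [i for i, c in enumerate(s) if c == '1']
--     for i in zi[:t_cnt_1]:
--         res[i] = '1'
--     for i in oi[:t_cnt_0]:
--         res[i] = '1'
--     return ''.join(res)
-- ===== Notes on version B (the rewrite author's own statement) =====
-- stated objective: alternative
-- what changed: Replaces A's single interleaved scan with mutable budget counters by an index-collection phase (positions of '0' and of '1' in s) followed by prefix-slice marking of a preallocated '0' list.
import Mathlib
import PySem

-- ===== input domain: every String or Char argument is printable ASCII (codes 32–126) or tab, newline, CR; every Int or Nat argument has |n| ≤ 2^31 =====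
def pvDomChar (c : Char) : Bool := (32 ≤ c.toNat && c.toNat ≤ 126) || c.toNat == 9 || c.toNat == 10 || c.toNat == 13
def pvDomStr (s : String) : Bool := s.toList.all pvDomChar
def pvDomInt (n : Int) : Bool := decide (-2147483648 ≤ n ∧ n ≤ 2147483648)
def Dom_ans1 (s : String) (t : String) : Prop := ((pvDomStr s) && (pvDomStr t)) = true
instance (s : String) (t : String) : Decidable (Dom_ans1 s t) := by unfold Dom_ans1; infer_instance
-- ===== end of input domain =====

-- B replaces A's interleaved budget-decrementing scan by index collection plus prefix marking
-- (alternative decomposition of the same work; no speed claim).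

-- ===== PORT A =====
-- A's single scan: budgets (t_cnt_1, t_cnt_0) from t, then one fold over s appending to res.
def ans1 (s : String) (t : String) : String :=
  let tCnt1 : Int := t.toList.foldl (fun n c => n + (if c = '1' then 1 else 0)) 0
  let tCnt0 : Int := t.toList.foldl (fun n c => n + (if c = '0' then 1 else 0)) 0
  let r :=
    s.toList.foldl
      (fun (st : List Char × Int × Int) c =>
        if c = '0' ∧ 0 < st.2.1 then (st.1 ++ ['1'], st.2.1 - 1, st.2.2)
        else if c = '1' ∧ 0 < st.2.2 then (st.1 ++ ['1'], st.2.1, st.2.2 - 1)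
        else (st.1 ++ ['0'], st.2.1, st.2.2))
      (([] : List Char), tCnt1, tCnt0)
  String.mk r.1

-- ===== PORT B =====
-- t.count('1') for a one-character needle is the character count.
def ans1_alt (s : String) (t : String) : String :=
  let tCnt1 : Nat := t.toList.count '1'
  let tCnt0 : Nat := t.toList.count '0'
  let res0 : List Char := List.replicate s.toList.length '0'
  let zi : List Int := (PySem.List.enumerate s.toList).filterMap
      (fun p => if p.2 = '0' then some p.1 else none)
  let oi : List Int := (PySem.List.enumerate s.toList).filterMap
      (fun p => if p.2 = '1' then some p.1 else none)
  let res1 := (zi.take tCnt1).foldl (fun r i => PySem.List.pySetD r i '1') res0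
  let res2 := (oi.take tCnt0).foldl (fun r i => PySem.List.pySetD r i '1') res1
  String.mk res2

-- ===== PRECONDITION & SPEC =====
def Spec_ans1 (s : String) (t : String) (out : String) : Prop := out = ans1_alt s t
instance (s : String) (t : String) (out : String) : Decidable (Spec_ans1 s t out) := by unfold Spec_ans1; infer_instance

-- ===== CLAIM (what is proved, stated in full; the proofs are below) =====
def Claim_equal_ans1 : Prop := ∀ (s : String) (t : String), Dom_ans1 s t → Spec_ans1 s t (ans1 s t)

-- ===== LEMMAS AND PROOFS =====

-- A's scan as a structural recursion (proof-side view of A's fold).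
def aCore : List Char → Int → Int → List Char
  | [], _, _ => []
  | c :: cs, a, b =>
    if c = '0' ∧ 0 < a then '1' :: aCore cs (a - 1) b
    else if c = '1' ∧ 0 < b then '1' :: aCore cs a (b - 1)
    else '0' :: aCore cs a b

-- Nat-index view of the enumerate/filterMap comprehensions.
def natIdxs (ch : Char) : List Char → List Nat
  | [] => []
  | c :: cs => if c = ch then 0 :: (natIdxs ch cs).map (· + 1) else (natIdxs ch cs).map (· + 1)

lemma natIdxs_self (ch : Char) (cs : List Char) :
    natIdxs ch (ch :: cs) = 0 :: (natIdxs ch cs).map (· + 1) := by simp [natIdxs]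

lemma natIdxs_other (ch c : Char) (cs : List Char) (h : c ≠ ch) :
    natIdxs ch (c :: cs) = (natIdxs ch cs).map (· + 1) := by simp [natIdxs, h]

lemma cnt_foldl (v : Char) (l : List Char) (n : Int) :
    l.foldl (fun acc c => acc + (if c = v then 1 else 0)) n = n + (l.count v : Int) := by
  induction l generalizing n with
  | nil => simp
  | cons c cs ih =>
    simp only [List.foldl_cons, ih, List.count_cons]
    by_cases h : c = v
    · simp [h]; ring
    · simp [h]

lemma aFold (cs : List Char) (res : List Char) (a b : Int) :
    (cs.foldl
      (fun (st : List Char × Int × Int) c =>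
        if c = '0' ∧ 0 < st.2.1 then (st.1 ++ ['1'], st.2.1 - 1, st.2.2)
        else if c = '1' ∧ 0 < st.2.2 then (st.1 ++ ['1'], st.2.1, st.2.2 - 1)
        else (st.1 ++ ['0'], st.2.1, st.2.2))
      (res, a, b)).1 = res ++ aCore cs a b := by
  induction cs generalizing res a b with
  | nil => simp [aCore]
  | cons c cs ih =>
    simp only [List.foldl_cons, aCore]
    split_ifs with h1 h2
    · rw [ih]; simp
    · rw [ih]; simp
    · rw [ih]; simp

-- index-shifted cast used to state the enumerate/filterMap characterisation
def shiftCast (s : Int) (n : Nat) : Int := (n : Int) + s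

lemma map_shiftCast_succ (L : List Nat) (s : Int) :
    L.map (shiftCast (s + 1)) = (L.map (· + 1)).map (shiftCast s) := by
  rw [List.map_map]
  exact List.map_congr_left fun n _ => by
    simp only [Function.comp_apply, shiftCast]; push_cast; ring

lemma enumIdxs (ch : Char) (cs : List Char) (s : Int) :
    (PySem.List.enumerate cs s).filterMap (fun p => if p.2 = ch then some p.1 else none)
      = (natIdxs ch cs).map (shiftCast s) := by
  induction cs generalizing s with
  | nil => simp [natIdxs, PySem.List.enumerate]
  | cons c cs ih =>
    rw [PySem.List.enumerate_cons]
    by_cases h : c = ch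
    · subst h
      rw [List.filterMap_cons_some (b := s) (by simp), ih (s + 1), natIdxs_self, List.map_cons,
          map_shiftCast_succ]
      simp [shiftCast]
    · rw [List.filterMap_cons_none (by simp [h]), ih (s + 1), natIdxs_other ch c cs h,
          map_shiftCast_succ]

lemma setShift (idxs : List Nat) (x : Char) (xs : List Char) :
    (idxs.map (· + 1)).foldl (fun r i => r.set i '1') (x :: xs)
      = x :: idxs.foldl (fun r i => r.set i '1') xs := by
  induction idxs generalizing xs with
  | nil => simp
  | cons i is ih => simp [List.set_cons_succ, ih]

lemma mark_eq (cs : List Char) (a b : Nat) :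
    ((natIdxs '1' cs).take b).foldl (fun r i => r.set i '1')
      (((natIdxs '0' cs).take a).foldl (fun r i => r.set i '1')
        (List.replicate cs.length '0'))
      = aCore cs (a : Int) (b : Int) := by
  induction cs generalizing a b with
  | nil => simp [natIdxs, aCore]
  | cons c cs ih =>
    by_cases h0 : c = '0'
    · subst h0
      rw [natIdxs_self, natIdxs_other '1' '0' cs (by decide),
          List.length_cons, List.replicate_succ]
      cases a with
      | zero =>
        rw [List.take_zero, List.foldl_nil, ← List.map_take, setShift]
        have hA : aCore ('0' :: cs) ((0 : Nat) : Int) (b : Int)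
            = '0' :: aCore cs ((0 : Nat) : Int) (b : Int) := by
          simp [aCore]
        rw [hA]
        have := ih 0 b
        rw [List.take_zero, List.foldl_nil] at this
        rw [this]
      | succ a' =>
        rw [List.take_succ_cons, List.foldl_cons]
        have hset : (('0' : Char) :: List.replicate cs.length '0').set 0 '1'
            = '1' :: List.replicate cs.length '0' := rfl
        rw [hset, ← List.map_take, setShift, ← List.map_take, setShift, ih a' b]
        have hA : aCore ('0' :: cs) ((a' + 1 : Nat) : Int) (b : Int)
            = '1' :: aCore cs ((a' : Nat) : Int) (b : Int) := by
          have hpos : (0 : Int) < ((a' + 1 : Nat) : Int) := by positivity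
          have hc : ((a' + 1 : Nat) : Int) - 1 = ((a' : Nat) : Int) := by push_cast; ring
          simp [aCore, hpos, hc]
        rw [hA]
    · by_cases h1 : c = '1'
      · subst h1
        rw [natIdxs_self, natIdxs_other '0' '1' cs (by decide),
            List.length_cons, List.replicate_succ, ← List.map_take, setShift]
        cases b with
        | zero =>
          rw [List.take_zero, List.foldl_nil]
          have hA : aCore ('1' :: cs) ((a : Nat) : Int) ((0 : Nat) : Int)
              = '0' :: aCore cs ((a : Nat) : Int) ((0 : Nat) : Int) := by
            simp [aCore]
          rw [hA]
          have := ih a 0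
          rw [List.take_zero, List.foldl_nil] at this
          rw [this]
        | succ b' =>
          rw [List.take_succ_cons, List.foldl_cons]
          have hset : ∀ (xs : List Char), (('0' : Char) :: xs).set 0 '1' = '1' :: xs :=
            fun xs => rfl
          rw [hset, ← List.map_take, setShift, ih a b']
          have hA : aCore ('1' :: cs) ((a : Nat) : Int) ((b' + 1 : Nat) : Int)
              = '1' :: aCore cs ((a : Nat) : Int) ((b' : Nat) : Int) := by
            have hpos : (0 : Int) < ((b' + 1 : Nat) : Int) := by positivity
            have hc : ((b' + 1 : Nat) : Int) - 1 = ((b' : Nat) : Int) := by push_cast; ring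
            simp [aCore, hpos, hc]
          rw [hA]
      · rw [natIdxs_other '0' c cs h0, natIdxs_other '1' c cs h1,
            List.length_cons, List.replicate_succ,
            ← List.map_take, setShift, ← List.map_take, setShift, ih a b]
        have hA : aCore (c :: cs) ((a : Nat) : Int) ((b : Nat) : Int)
            = '0' :: aCore cs ((a : Nat) : Int) ((b : Nat) : Int) := by
          simp [aCore, h0, h1]
        rw [hA]

lemma foldl_pySetD_shift (idxs : List Nat) (res : List Char) :
    (idxs.map (shiftCast 0)).foldl (fun r i => PySem.List.pySetD r i '1') res
      = idxs.foldl (fun r i => r.set i '1') res := by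
  induction idxs generalizing res with
  | nil => rfl
  | cons i is ih =>
    simp only [List.map_cons, List.foldl_cons, shiftCast]
    rw [show ((i : Int) + 0) = (i : Int) by ring, PySem.List.pySetD_natCast, ih]

-- ===== VERDICT (by name: the statement is the Claim_ definition above) =====
theorem ans1_spec : Claim_equal_ans1 := by
  intro s t _
  unfold Spec_ans1 ans1 ans1_alt
  simp only [cnt_foldl, aFold, List.nil_append, zero_add]
  rw [enumIdxs, enumIdxs, ← List.map_take, ← List.map_take,
      foldl_pySetD_shift, foldl_pySetD_shift, mark_eq]
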